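-- pv_equiv track=rewrite | github.com/pkupig/Orbifold-HNP | src/core/sat_solver.py | _parse_assignment
-- ===== SOURCE A (Python) =====
-- from typing import List, Tuple, Optional, Dict, Any, Set
--
-- def _parse_assignment(output: str, n_vars_hint: int = 0) -> List[int]:
--     """从求解器输出解析赋值"""
--     assignment = []
--
--     for line in output.split('\n'):
--         line = line.strip()
--         if line.startswith('v'):
--             # 解析赋值行，如 "v 1 -2 3 0"
--             parts = line.split()
--             for part in parts[1:]:  # 跳过'v'
--                 if part == '0':
--                     break
--                 try:
--                     lit = int(part)
--                     assignment.append(lit)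
--                 except ValueError:
--                     continue
--
--     # 如果解析失败，尝试其他格式
--     if not assignment and n_vars_hint > 0:
--         # 有些求解器可能使用不同格式
--         lines = output.split('\n')
--         for line in lines:
--             if line and not line.startswith(('c', 's', 'v')):
--                 parts = line.split()
--                 for part in parts:
--                     if part == '0':
--                         break
--                     try:
--                         lit = int(part)
--                         if abs(lit) <= n_vars_hint:
--                             assignment.append(lit)
--                     except ValueError:
--                         continue
--
--     return assignment
-- ===== SOURCE B (Python) =====
-- # One fused pass over the lines building both the 'v'-line assignment and the
-- # fallback-format assignment, selecting at the end (A scans twice).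
-- def _ints_until_zero(parts):
--     out = []
--     for p in parts:
--         if p == '0':
--             break
--         try:
--             out.append(int(p))
--         except ValueError:
--             pass
--     return out
--
-- def _parse_assignment(output, n_vars_hint=0):
--     primary = []
--     fallback = []
--     for line in output.split('\n'):
--         stripped = line.strip()
--         if stripped.startswith('v'):
--             primary.extend(_ints_until_zero(stripped.split()[1:]))
--         if line and not line.startswith(('c', 's', 'v')):
--             fallback.extend(l for l in _ints_until_zero(line.split())
--                             if abs(l) <= n_vars_hint)
--     if primary:
--         return primary
--     return fallback if n_vars_hint > 0 else []
-- ===== Notes on version B (the rewrite author's own statement) =====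
-- stated objective: alternative
-- what changed: B makes one fused pass over the lines, building the primary assignment-line list and the fallback-format list simultaneously via a shared break-on-terminator token parser, and selects between them at the end, instead of A's scan followed by a conditional second rescan of the output.
import Mathlib
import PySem

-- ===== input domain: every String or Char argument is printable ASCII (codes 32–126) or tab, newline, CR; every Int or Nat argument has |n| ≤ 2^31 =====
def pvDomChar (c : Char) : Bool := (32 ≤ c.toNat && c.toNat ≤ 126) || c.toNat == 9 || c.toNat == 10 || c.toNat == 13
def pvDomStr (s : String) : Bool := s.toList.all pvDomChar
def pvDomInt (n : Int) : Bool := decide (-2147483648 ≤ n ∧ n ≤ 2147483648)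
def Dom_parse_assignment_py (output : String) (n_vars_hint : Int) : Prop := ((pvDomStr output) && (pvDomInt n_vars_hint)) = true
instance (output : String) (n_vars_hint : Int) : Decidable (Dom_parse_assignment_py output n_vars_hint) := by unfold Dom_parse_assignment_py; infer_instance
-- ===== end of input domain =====

-- B fuses A's two scans of the output into one pass building both candidate lists; return value equivalence, no side effects involved.

-- ===== PORT A =====
-- output.split("\n"): sep is the literal nonempty "\n", so Str.split? is always some; .getD [] is exact
-- inner loop of A's first phase: break on the terminator token, append parsed ints, skip ValueError
def pvA1 (acc : List Int) : List String → List Int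
  | [] => acc
  | p :: rest =>
    if p = "0" then acc
    else match PySem.Int.ofStr? p with
      | some l => pvA1 (acc ++ [l]) rest
      | none => pvA1 acc rest

-- inner loop of A's second phase: additionally keep only |lit| ≤ n_vars_hint
def pvA2 (n : Int) (acc : List Int) : List String → List Int
  | [] => acc
  | p :: rest =>
    if p = "0" then acc
    else match PySem.Int.ofStr? p with
      | some l => if |l| ≤ n then pvA2 n (acc ++ [l]) rest else pvA2 n acc rest
      | none => pvA2 n acc rest

def parse_assignment_py (output : String) (n_vars_hint : Int) : List Int :=
  let assignment : List Int :=
    ((PySem.Str.split? output "\n").getD []).foldl (fun acc line =>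
      let line := PySem.Str.strip line
      if PySem.Str.startswith line "v" then
        pvA1 acc ((PySem.Str.split₀ line).drop 1)
      else acc) []
  if assignment = [] ∧ n_vars_hint > 0 then
    ((PySem.Str.split? output "\n").getD []).foldl (fun acc line =>
      if line ≠ "" ∧ ¬(PySem.Str.startswith line "c" ∨ PySem.Str.startswith line "s" ∨ PySem.Str.startswith line "v") then
        pvA2 n_vars_hint acc (PySem.Str.split₀ line)
      else acc) assignment
  else assignment

-- ===== PORT B =====
-- _ints_until_zero: parse ints until the terminator token, skipping non-ints
def pvIntsUntilZero : List String → List Int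
  | [] => []
  | p :: rest =>
    if p = "0" then []
    else match PySem.Int.ofStr? p with
      | some l => l :: pvIntsUntilZero rest
      | none => pvIntsUntilZero rest

def parse_assignment_py_alt (output : String) (n_vars_hint : Int) : List Int :=
  let st : List Int × List Int :=
    ((PySem.Str.split? output "\n").getD []).foldl (fun st line =>
      let stripped := PySem.Str.strip line
      let st1 :=
        if PySem.Str.startswith stripped "v" then
          (st.1 ++ pvIntsUntilZero ((PySem.Str.split₀ stripped).drop 1), st.2)
        else st
      if line ≠ "" ∧ ¬(PySem.Str.startswith line "c" ∨ PySem.Str.startswith line "s" ∨ PySem.Str.startswith line "v") then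
        (st1.1, st1.2 ++ (pvIntsUntilZero (PySem.Str.split₀ line)).filter (fun l => |l| ≤ n_vars_hint))
      else st1) ([], [])
  if st.1 ≠ [] then st.1
  else if n_vars_hint > 0 then st.2 else []

-- ===== PRECONDITION & SPEC =====
def Spec_parse_assignment_py (output : String) (n_vars_hint : Int) (out : List Int) : Prop := out = parse_assignment_py_alt output n_vars_hint
instance (output : String) (n_vars_hint : Int) (out : List Int) : Decidable (Spec_parse_assignment_py output n_vars_hint out) := by unfold Spec_parse_assignment_py; infer_instance

-- ===== CLAIM (what is proved, stated in full; the proofs are below) =====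
def Claim_equal_parse_assignment_py : Prop := ∀ (output : String) (n_vars_hint : Int), Dom_parse_assignment_py output n_vars_hint → Spec_parse_assignment_py output n_vars_hint (parse_assignment_py output n_vars_hint)

-- ===== LEMMAS AND PROOFS =====

lemma pvA1_eq (parts : List String) : ∀ acc, pvA1 acc parts = acc ++ pvIntsUntilZero parts := by
  induction parts with
  | nil => intro acc; simp [pvA1, pvIntsUntilZero]
  | cons p rest ih =>
    intro acc
    simp only [pvA1, pvIntsUntilZero]
    split_ifs with h
    · simp
    · cases hof : PySem.Int.ofStr? p with
      | some l => simp [ih]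
      | none => simp [ih]

lemma pvA2_eq (n : Int) (parts : List String) :
    ∀ acc, pvA2 n acc parts = acc ++ (pvIntsUntilZero parts).filter (fun l => |l| ≤ n) := by
  induction parts with
  | nil => intro acc; simp [pvA2, pvIntsUntilZero]
  | cons p rest ih =>
    intro acc
    simp only [pvA2, pvIntsUntilZero]
    split_ifs with h
    · simp
    · cases hof : PySem.Int.ofStr? p with
      | some l =>
        by_cases hl : |l| ≤ n
        · simp [hl, ih, List.filter]
        · simp [hl, ih, List.filter]
      | none => simp [ih]

-- the fused fold is the product of A's two independent folds
lemma pvFused_eq (n : Int) (lines : List String) : ∀ (p f : List Int),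
    lines.foldl (fun st line =>
      let stripped := PySem.Str.strip line
      let st1 :=
        if PySem.Str.startswith stripped "v" then
          (st.1 ++ pvIntsUntilZero ((PySem.Str.split₀ stripped).drop 1), st.2)
        else st
      if line ≠ "" ∧ ¬(PySem.Str.startswith line "c" ∨ PySem.Str.startswith line "s" ∨ PySem.Str.startswith line "v") then
        (st1.1, st1.2 ++ (pvIntsUntilZero (PySem.Str.split₀ line)).filter (fun l => |l| ≤ n))
      else st1) (p, f)
    = (lines.foldl (fun acc line =>
        let line := PySem.Str.strip line
        if PySem.Str.startswith line "v" then
          pvA1 acc ((PySem.Str.split₀ line).drop 1)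
        else acc) p,
       lines.foldl (fun acc line =>
        if line ≠ "" ∧ ¬(PySem.Str.startswith line "c" ∨ PySem.Str.startswith line "s" ∨ PySem.Str.startswith line "v") then
          pvA2 n acc (PySem.Str.split₀ line)
        else acc) f) := by
  induction lines with
  | nil => intro p f; rfl
  | cons line rest ih =>
    intro p f
    simp only [List.foldl_cons]
    rw [← ih]
    congr 1
    split_ifs with h1 h2 <;> simp [pvA1_eq, pvA2_eq]

theorem pv_main (output : String) (n_vars_hint : Int) :
    parse_assignment_py output n_vars_hint = parse_assignment_py_alt output n_vars_hint := by
  unfold parse_assignment_py parse_assignment_py_alt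
  rw [pvFused_eq]
  set a := ((PySem.Str.split? output "\n").getD []).foldl (fun acc line =>
      let line := PySem.Str.strip line
      if PySem.Str.startswith line "v" then
        pvA1 acc ((PySem.Str.split₀ line).drop 1)
      else acc) [] with ha
  by_cases hae : a = []
  · by_cases hn : n_vars_hint > 0
    · simp [hae, hn]
    · simp [hae, hn]
  · simp [hae]
-- ===== VERDICT (by name: the statement is the Claim_ definition above) =====
theorem parse_assignment_py_spec : Claim_equal_parse_assignment_py := by
  intro output n_vars_hint _
  exact pv_main output n_vars_hint
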